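-- pv_equiv track=rewrite | github.com/stanford-crfm/levanter | src/levanter/optim/soap.py | _sort_and_group_matrices
-- ===== SOURCE A (Python) =====
-- from collections import defaultdict
-- from typing import List, Optional, Tuple, Union
--
-- def _sort_and_group_matrices(matrix_shapes: List[Tuple[int, ...]]):
--     indexed_list = list(enumerate(matrix_shapes))
--     sorted_indexed = sorted(indexed_list, key=lambda x: x[1])
--     sorted_shapes = [shape for _, shape in sorted_indexed]
--     change_indices = [original_index for original_index, _ in sorted_indexed]
--     revert_indices = [0] * len(matrix_shapes)
--     for new_pos, (original_index, _) in enumerate(sorted_indexed):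
--         revert_indices[original_index] = new_pos
--     shape_groups = defaultdict(list)
--     for i, shape in enumerate(sorted_shapes):
--         shape_groups[shape].append(i)
--     unique_sorted_shapes = list(shape_groups.keys())
--     return unique_sorted_shapes, dict(shape_groups), change_indices, revert_indices
-- ===== SOURCE B (Python) =====
-- def _sort_and_group_matrices(matrix_shapes):
--     # Group first: shape -> ascending original indices (insertion order of first occurrence).
--     groups = {}
--     for i, shape in enumerate(matrix_shapes):
--         groups.setdefault(shape, []).append(i)
--     # Sort only the unique shapes.
--     unique_sorted_shapes = sorted(groups)
--     # Concatenate the groups' original indices in sorted-shape order.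
--     change_indices = []
--     for shape in unique_sorted_shapes:
--         change_indices.extend(groups[shape])
--     # Each shape owns a contiguous block of new positions.
--     shape_groups = {}
--     pos = 0
--     for shape in unique_sorted_shapes:
--         n = len(groups[shape])
--         shape_groups[shape] = list(range(pos, pos + n))
--         pos += n
--     # Inverse permutation.
--     revert_indices = [0] * len(matrix_shapes)
--     for new_pos, original_index in enumerate(change_indices):
--         revert_indices[original_index] = new_pos
--     return unique_sorted_shapes, shape_groups, change_indices, revert_indices
-- ===== Notes on version B (the rewrite author's own statement) =====
-- stated objective: alternative
-- what changed: Instead of stably sorting all (index, shape) pairs and regrouping afterwards, B groups original indices by shape in one dict pass, sorts only the unique shapes, and lays out change/revert indices and contiguous position blocks by concatenating the groups.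
import Mathlib
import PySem

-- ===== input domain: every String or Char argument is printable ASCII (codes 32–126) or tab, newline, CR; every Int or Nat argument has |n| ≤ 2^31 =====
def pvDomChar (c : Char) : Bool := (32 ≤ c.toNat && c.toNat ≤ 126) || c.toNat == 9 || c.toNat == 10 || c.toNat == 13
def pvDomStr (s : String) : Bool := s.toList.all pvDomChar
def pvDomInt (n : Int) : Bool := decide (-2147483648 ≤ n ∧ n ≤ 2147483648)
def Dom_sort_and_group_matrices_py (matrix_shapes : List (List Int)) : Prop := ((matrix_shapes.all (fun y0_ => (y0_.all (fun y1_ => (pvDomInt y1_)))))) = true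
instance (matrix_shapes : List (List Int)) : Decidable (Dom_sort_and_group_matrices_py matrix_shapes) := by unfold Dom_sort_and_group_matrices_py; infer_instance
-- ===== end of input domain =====

-- B replaces A's stable sort of all (index, shape) pairs by a one-pass grouping of
-- original indices per shape, a sort of only the unique shapes, and a concatenation
-- of the groups (objective: alternative decomposition, similar cost).

-- ===== PORT A =====
-- revert_indices[original_index] = new_pos : original_index comes from enumerate, so it is ≥ 0
-- and < len; List.set at .toNat is exact there.
def sort_and_group_matrices_py (matrix_shapes : List (List Int)) :
    List (List Int) × (List (List Int × List Int)) × List Int × List Int :=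
  let indexed_list := PySem.List.enumerate matrix_shapes
  let sorted_indexed := PySem.List.sorted indexed_list (fun x => x.2)
  let sorted_shapes := sorted_indexed.map (fun p => p.2)
  let change_indices := sorted_indexed.map (fun p => p.1)
  let revert_indices := (PySem.List.enumerate sorted_indexed).foldl
      (fun rv q => rv.set q.2.1.toNat q.1) (List.replicate matrix_shapes.length (0 : Int))
  let shape_groups := (PySem.List.enumerate sorted_shapes).foldl
      (fun d p => PySem.Dict.modify d p.2 [] (fun l => l ++ [p.1])) PySem.Dict.empty
  let unique_sorted_shapes := shape_groups.keys
  (unique_sorted_shapes, shape_groups.items, change_indices, revert_indices)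

-- ===== PORT B =====
-- groups.setdefault(shape, []).append(i) = modify shape [] (· ++ [i]); groups[shape] is ported
-- as getD shape [] (the key is always present when read).
def sort_and_group_matrices_py_alt (matrix_shapes : List (List Int)) :
    List (List Int) × (List (List Int × List Int)) × List Int × List Int :=
  let groups := (PySem.List.enumerate matrix_shapes).foldl
      (fun d p => PySem.Dict.modify d p.2 [] (fun l => l ++ [p.1])) PySem.Dict.empty
  let unique_sorted_shapes := PySem.List.sorted (PySem.Dict.keys groups) (fun s => s)
  let change_indices := unique_sorted_shapes.foldl
      (fun acc s => acc ++ PySem.Dict.getD groups s []) []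
  let sgp := unique_sorted_shapes.foldl
      (fun st s =>
        let n := (PySem.Dict.getD groups s []).length
        (PySem.Dict.insert st.1 s (PySem.List.pyRange st.2 (st.2 + (n : Int))), st.2 + (n : Int)))
      (PySem.Dict.empty, (0 : Int))
  let revert_indices := (PySem.List.enumerate change_indices).foldl
      (fun rv q => rv.set q.2.toNat q.1) (List.replicate matrix_shapes.length (0 : Int))
  (unique_sorted_shapes, sgp.1.items, change_indices, revert_indices)

-- ===== PRECONDITION & SPEC =====
def Spec_sort_and_group_matrices_py (matrix_shapes : List (List Int)) (out : List (List Int) × (List (List Int × List Int)) × List Int × List Int) : Prop := out = sort_and_group_matrices_py_alt matrix_shapes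
instance (matrix_shapes : List (List Int)) (out : List (List Int) × (List (List Int × List Int)) × List Int × List Int) : Decidable (Spec_sort_and_group_matrices_py matrix_shapes out) := by unfold Spec_sort_and_group_matrices_py; infer_instance

-- ===== CLAIM (what is proved, stated in full; the proofs are below) =====
def Claim_equal_sort_and_group_matrices_py : Prop := ∀ (matrix_shapes : List (List Int)), Dom_sort_and_group_matrices_py matrix_shapes → Spec_sort_and_group_matrices_py matrix_shapes (sort_and_group_matrices_py matrix_shapes)

-- ===== LEMMAS AND PROOFS =====
-- proof-side helpers
def pvOcc (l : List (Int × List Int)) (s : List Int) : List Int :=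
  (l.filter (fun p => p.2 == s)).map (fun p => p.1)

def pvGrp (l : List (Int × List Int)) : PySem.Dict (List Int) (List Int) :=
  l.foldl (fun d p => PySem.Dict.modify d p.2 [] (fun v => v ++ [p.1])) PySem.Dict.empty

def pvCanon (g : List Int → Nat) : List (List Int) → Int → List ((List Int) × List Int)
  | [], _ => []
  | s :: t, pos => (s, PySem.List.pyRange pos (pos + (g s : Int))) :: pvCanon g t (pos + (g s : Int))

-- ===== dict lemmas =====
theorem pvGetD_grp (l : List (Int × List Int)) (s : List Int) :
    (pvGrp l).getD s [] = pvOcc l s := by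
  have h : pvGrp l = (l.map (fun p => (p.2, p.1))).foldl
      (fun d q => d.modify q.1 [] (fun v => v ++ [q.2])) PySem.Dict.empty := by
    rw [List.foldl_map]; rfl
  rw [h, PySem.Dict.getD_foldl_modify_append]
  simp [pvOcc, List.filter_map, Function.comp_def]

theorem pvKeys_grp (l : List (Int × List Int)) :
    (pvGrp l).keys = PySem.Set.ofList (l.map (fun p => p.2)) := by
  unfold pvGrp
  rw [PySem.Dict.keys_foldl_modify_key l (fun p => p.2) [] (fun d p => (fun v => v ++ [p.1]))]
  rfl

-- ===== stable sort = lex sort =====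
theorem pvInsertBy_congr {α : Type} (b₁ b₂ : α → α → Bool) (x : α) (l : List α)
    (h : ∀ y ∈ l, b₁ x y = b₂ x y) :
    PySem.List.insertBy b₁ x l = PySem.List.insertBy b₂ x l := by
  induction l with
  | nil => rfl
  | cons y t ih =>
      have hy := h y (by simp)
      simp only [PySem.List.insertBy, hy]
      split
      · rfl
      · rw [ih (fun z hz => h z (by simp [hz]))]

theorem pvFoldlIns_aux (l acc : List (Int × List Int))
    (hacc : ∀ y ∈ acc, ∀ z ∈ l, y.1 < z.1)
    (hl : List.Pairwise (fun p q => p.1 < q.1) l) :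
    l.foldl (fun a x => PySem.List.insertBy (fun a b => decide (a.2 < b.2)) x a) acc
      = l.foldl (fun a x => PySem.List.insertBy
          (fun a b => decide (toLex (a.2, a.1) < toLex (b.2, b.1))) x a) acc := by
  induction l generalizing acc with
  | nil => rfl
  | cons x t ih =>
      have hx : PySem.List.insertBy (fun a b => decide (a.2 < b.2)) x acc
          = PySem.List.insertBy (fun a b => decide (toLex (a.2, a.1) < toLex (b.2, b.1))) x acc := by
        apply pvInsertBy_congr
        intro y hy
        have h1 : y.1 < x.1 := hacc y hy x (by simp)
        have : (x.2 < y.2) ↔ (toLex (x.2, x.1) < toLex (y.2, y.1)) := by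
          rw [Prod.Lex.toLex_lt_toLex]
          constructor
          · exact fun h => Or.inl h
          · rintro (h | ⟨h, h2⟩)
            · exact h
            · omega
        simpa using this
      simp only [List.foldl_cons, hx]
      apply ih
      · intro y hy z hz
        rcases (PySem.List.mem_insertBy _ _ _ _).1 hy with h | h
        · subst h; exact (List.pairwise_cons.1 hl).1 z hz
        · exact hacc y h z (by simp [hz])
      · exact (List.pairwise_cons.1 hl).2

theorem pvSorted_lex (l : List (Int × List Int))
    (h : List.Pairwise (fun p q => p.1 < q.1) l) :
    PySem.List.sorted l (fun p => p.2)
      = PySem.List.sorted l (fun p => toLex (p.2, p.1)) := by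
  rw [PySem.List.sorted_eq_foldl_insertBy, PySem.List.sorted_eq_foldl_insertBy]
  exact pvFoldlIns_aux l [] (by simp) h

-- ===== permutation of grouped filters =====
theorem pvFlatMap_filter_perm (U : List (List Int)) (E : List (Int × List Int))
    (hU : U.Nodup) (hk : ∀ p ∈ E, p.2 ∈ U) :
    (U.flatMap (fun s => E.filter (fun p => p.2 == s))).Perm E := by
  induction U generalizing E with
  | nil =>
      have : E = [] := by
        cases E with
        | nil => rfl
        | cons p t => exact absurd (hk p (by simp)) (by simp)
      simp [this]
  | cons u U' ih =>
      simp only [List.flatMap_cons]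
      have hrw : U'.flatMap (fun s => E.filter (fun p => p.2 == s))
          = U'.flatMap (fun s => (E.filter (fun p => !(p.2 == u))).filter (fun p => p.2 == s)) := by
        apply List.flatMap_congr
        intro t ht
        rw [List.filter_filter]
        apply List.filter_congr
        intro p _
        have htu : t ≠ u := by
          rintro rfl; exact (List.pairwise_cons.1 hU).1 t ht rfl
        by_cases h : p.2 = t
        · simp [h, htu]
        · simp [h]
      rw [hrw]
      have hside : ∀ p ∈ E.filter (fun p => !(p.2 == u)), p.2 ∈ U' := by
        intro p hp
        have hmem := hk p (List.mem_of_mem_filter hp)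
        have hne : ¬ (p.2 = u) := by
          have := List.of_mem_filter hp
          simpa using this
        rcases List.mem_cons.1 hmem with h | h
        · exact absurd h hne
        · exact h
      have hperm := ih (E.filter (fun p => !(p.2 == u))) hU.of_cons hside
      have h1 : (E.filter (fun p => p.2 == u)
            ++ U'.flatMap (fun s => (E.filter (fun p => !(p.2 == u))).filter (fun p => p.2 == s))).Perm
            (E.filter (fun p => p.2 == u) ++ E.filter (fun p => !(p.2 == u))) :=
        List.Perm.append_left _ hperm
      exact h1.trans (List.filter_append_perm _ E)

-- ===== MAIN: the stable sort is the grouped layout =====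
theorem pvMain (xs : List (List Int)) :
    PySem.List.sorted (PySem.List.enumerate xs) (fun p => p.2)
      = (PySem.List.sorted (PySem.Set.ofList xs) (fun s => s)).flatMap
          (fun s => (PySem.List.enumerate xs).filter (fun p => p.2 == s)) := by
  rw [pvSorted_lex _ (PySem.List.pairwise_lt_enumerate xs 0)]
  apply PySem.List.sorted_eq_of_perm_of_pairwise_lt
  · -- permutation
    apply pvFlatMap_filter_perm
    · exact ((PySem.List.sorted_perm (PySem.Set.ofList xs) (fun s => s) false).nodup_iff).2
        (PySem.Set.nodup_ofList xs)
    · intro p hp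
      rcases (PySem.List.mem_enumerate_iff xs 0 p).1 hp with ⟨k, hk, rfl⟩
      rw [PySem.List.mem_sorted, PySem.Set.mem_ofList]
      exact List.getElem_mem hk
  · -- pairwise strict in the lex key
    rw [List.pairwise_flatMap]
    constructor
    · intro s _
      have hsub : (List.filter (fun p => p.2 == s) (PySem.List.enumerate xs)).Sublist
          (PySem.List.enumerate xs) := List.filter_sublist
      have hpw : List.Pairwise (fun p q => p.1 < q.1)
          (List.filter (fun p => p.2 == s) (PySem.List.enumerate xs)) :=
        (PySem.List.pairwise_lt_enumerate xs 0).sublist hsub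
      refine hpw.imp_of_mem ?_
      intro p q hp hq h1
      have hps : p.2 = s := by simpa using List.of_mem_filter hp
      have hqs : q.2 = s := by simpa using List.of_mem_filter hq
      rw [Prod.Lex.toLex_lt_toLex]
      exact Or.inr ⟨by rw [hps, hqs], h1⟩
    · have hU := PySem.List.sorted_ofList_pairwise_lt (κ := List Int) xs
      have hcast : (@PySem.List.sorted (List Int) (List Int) List.instLinearOrder.toLT
            LinearOrder.toDecidableLT (PySem.Set.ofList xs) (fun x => x) false)
          = PySem.List.sorted (PySem.Set.ofList xs) (fun s => s) := by congr 1
      rw [hcast] at hU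
      refine hU.imp ?_
      intro s t hst x hx y hy
      have hxs : x.2 = s := by simpa using List.of_mem_filter hx
      have hyt : y.2 = t := by simpa using List.of_mem_filter hy
      rw [Prod.Lex.toLex_lt_toLex]
      exact Or.inl (by rw [hxs, hyt]; exact hst)

-- ===== Set.ofList of a grouped list =====
theorem pvFoldlAdd_mem {α : Type} [BEq α] [LawfulBEq α] (n : Nat) (s : α) (acc : List α)
    (h : s ∈ acc) : (List.replicate n s).foldl PySem.Set.add acc = acc := by
  induction n with
  | zero => rfl
  | succ m ih =>
      simp only [List.replicate_succ, List.foldl_cons]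
      have : PySem.Set.add acc s = acc := by
        simp [PySem.Set.add, PySem.Set.contains, h]
      rw [this, ih]

theorem pvFoldlAdd_cons {α : Type} [BEq α] [LawfulBEq α] (l : List α) (a : α) (acc : List α)
    (h : ∀ y ∈ l, y ≠ a) :
    l.foldl PySem.Set.add (a :: acc) = a :: l.foldl PySem.Set.add acc := by
  induction l generalizing acc with
  | nil => rfl
  | cons y t ih =>
      have hy : y ≠ a := h y (by simp)
      have hstep : PySem.Set.add (a :: acc) y = a :: PySem.Set.add acc y := by
        have hne : (a == y) = false := by simpa using (fun hq => hy hq.symm)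
        simp only [PySem.Set.add, PySem.Set.contains, List.contains_cons]
        split <;> simp_all
      simp only [List.foldl_cons, hstep]
      exact ih _ (fun z hz => h z (by simp [hz]))

theorem pvOfList_grouped (U : List (List Int)) (g : List Int → Nat)
    (hU : U.Nodup) (hg : ∀ s ∈ U, g s ≠ 0) :
    PySem.Set.ofList (U.flatMap (fun s => List.replicate (g s) s)) = U := by
  induction U with
  | nil => rfl
  | cons u U' ih =>
      have hn : g u ≠ 0 := hg u (by simp)
      obtain ⟨m, hm⟩ : ∃ m, g u = m + 1 := ⟨g u - 1, by omega⟩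
      have h1 : PySem.Set.ofList ((u :: U').flatMap (fun s => List.replicate (g s) s))
          = (U'.flatMap (fun s => List.replicate (g s) s)).foldl PySem.Set.add
              ((List.replicate (g u) u).foldl PySem.Set.add []) := by
        rw [PySem.Set.ofList_eq_foldl]
        simp [List.foldl_append]
      have h2 : (List.replicate (g u) u).foldl PySem.Set.add ([] : List (List Int)) = [u] := by
        rw [hm, List.replicate_succ, List.foldl_cons]
        have : PySem.Set.add ([] : List (List Int)) u = [u] := rfl
        rw [this]
        exact pvFoldlAdd_mem m u [u] (by simp)
      rw [h1, h2, pvFoldlAdd_cons]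
      · rw [← PySem.Set.ofList_eq_foldl, ih hU.of_cons (fun s hs => hg s (by simp [hs]))]
      · intro y hy
        rcases List.mem_flatMap.1 hy with ⟨t, ht, hyt⟩
        have : y = t := by
          have := List.eq_of_mem_replicate hyt
          exact this
        subst this
        rintro rfl
        exact (List.pairwise_cons.1 hU).1 y ht rfl

-- ===== occurrences over an enumerated grouped list =====
theorem pvOcc_append (l₁ l₂ : List (Int × List Int)) (s : List Int) :
    pvOcc (l₁ ++ l₂) s = pvOcc l₁ s ++ pvOcc l₂ s := by
  simp [pvOcc]

theorem pvOcc_enum_replicate (n : Nat) (s s' : List Int) (start : Int) :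
    pvOcc (PySem.List.enumerate (List.replicate n s) start) s'
      = if s' = s then PySem.List.pyRange start (start + (n : Int)) else [] := by
  have hall : ∀ p ∈ PySem.List.enumerate (List.replicate n s) start, p.2 = s := by
    intro p hp
    rcases (PySem.List.mem_enumerate_iff _ _ _).1 hp with ⟨k, hk, rfl⟩
    simp
  by_cases h : s' = s
  · have hfil : (PySem.List.enumerate (List.replicate n s) start).filter (fun p => p.2 == s')
        = PySem.List.enumerate (List.replicate n s) start := by
      apply List.filter_eq_self.2
      intro p hp
      simp [hall p hp, h]
    simp only [pvOcc, hfil, if_pos h]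
    have := PySem.List.map_fst_enumerate (List.replicate n s) start
    simpa using this
  · have hfil : (PySem.List.enumerate (List.replicate n s) start).filter (fun p => p.2 == s')
        = [] := by
      apply List.filter_eq_nil_iff.2
      intro p hp
      rw [hall p hp]
      simpa using fun hc => h hc.symm
    simp [pvOcc, hfil, h]

theorem pvOcc_enum_flat_notmem (U : List (List Int)) (g : List Int → Nat) (s : List Int)
    (start : Int) (hs : s ∉ U) :
    pvOcc (PySem.List.enumerate (U.flatMap (fun t => List.replicate (g t) t)) start) s = [] := by
  induction U generalizing start with
  | nil => rfl
  | cons u U' ih =>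
      simp only [List.flatMap_cons]
      rw [PySem.List.enumerate_append, pvOcc_append, pvOcc_enum_replicate]
      have hsu : s ≠ u := fun h => hs (by simp [h])
      rw [if_neg hsu]
      simp only [List.nil_append, List.length_replicate]
      exact ih _ (fun hmem => hs (List.mem_cons_of_mem _ hmem))

theorem pvPosl (U : List (List Int)) (g : List Int → Nat) (start : Int) (hU : U.Nodup) :
    U.map (fun s => (s, pvOcc (PySem.List.enumerate (U.flatMap (fun t => List.replicate (g t) t)) start) s))
      = pvCanon g U start := by
  induction U generalizing start with
  | nil => rfl
  | cons u U' ih =>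
      simp only [List.map_cons, List.flatMap_cons]
      have hu : pvOcc (PySem.List.enumerate
            (List.replicate (g u) u ++ U'.flatMap (fun t => List.replicate (g t) t)) start) u
          = PySem.List.pyRange start (start + (g u : Int)) := by
        rw [PySem.List.enumerate_append, pvOcc_append, pvOcc_enum_replicate, if_pos rfl]
        rw [List.length_replicate]
        rw [pvOcc_enum_flat_notmem U' g u _ (fun h => (List.pairwise_cons.1 hU).1 u h rfl)]
        simp
      rw [hu]
      have htail : U'.map (fun s => (s, pvOcc (PySem.List.enumerate
            (List.replicate (g u) u ++ U'.flatMap (fun t => List.replicate (g t) t)) start) s))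
          = U'.map (fun s => (s, pvOcc (PySem.List.enumerate
              (U'.flatMap (fun t => List.replicate (g t) t)) (start + (g u : Int))) s)) := by
        apply List.map_congr_left
        intro t ht
        rw [PySem.List.enumerate_append, pvOcc_append, pvOcc_enum_replicate]
        have htne : t ≠ u := fun he => (List.pairwise_cons.1 hU).1 t ht he.symm
        rw [if_neg htne, List.length_replicate]
        simp
      rw [htail, ih _ hU.of_cons]
      simp [pvCanon]

-- ===== B's block-layout fold =====
theorem pvBFold (U : List (List Int)) (h : List Int → List Int)
    (d : PySem.Dict (List Int) (List Int)) (pos : Int)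
    (hU : U.Nodup) (hd : ∀ s ∈ U, d.contains s = false) :
    ((U.foldl (fun st s =>
        (st.1.insert s (PySem.List.pyRange st.2 (st.2 + ((h s).length : Int))),
          st.2 + ((h s).length : Int))) (d, pos)).1).items
      = d.items ++ pvCanon (fun s => (h s).length) U pos := by
  induction U generalizing d pos with
  | nil => simp [pvCanon]
  | cons u U' ih =>
      simp only [List.foldl_cons]
      have hcu : d.contains u = false := hd u (by simp)
      have hstep := ih (d.insert u (PySem.List.pyRange pos (pos + ((h u).length : Int))))
        (pos + ((h u).length : Int)) hU.of_cons ?fresh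
      case fresh =>
        intro t ht
        rw [PySem.Dict.contains_insert]
        have htne : (t == u) = false := by
          simpa using fun he => (List.pairwise_cons.1 hU).1 t ht he.symm
        rw [htne]
        simpa using hd t (List.mem_cons_of_mem _ ht)
      rw [hstep, PySem.Dict.items_insert_of_not_contains d _ hcu]
      simp [pvCanon]

-- ===== enumerate of a map =====
theorem pvEnumerate_map {α β : Type} (l : List α) (f : α → β) (s : Int) :
    PySem.List.enumerate (l.map f) s
      = (PySem.List.enumerate l s).map (fun q => (q.1, f q.2)) := by
  induction l generalizing s with
  | nil => rfl
  | cons x t ih =>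
      simp only [List.map_cons, PySem.List.enumerate_cons, ih]

-- ===== VERDICT (by name: the statement is the Claim_ definition above) =====
theorem sort_and_group_matrices_py_spec : Claim_equal_sort_and_group_matrices_py := by
  intro xs _
  unfold Spec_sort_and_group_matrices_py sort_and_group_matrices_py sort_and_group_matrices_py_alt
  have hgrp : ∀ l : List (Int × List Int),
      l.foldl (fun d p => PySem.Dict.modify d p.2 [] (fun v => v ++ [p.1])) PySem.Dict.empty
        = pvGrp l := fun l => rfl
  simp only [hgrp]
  have hU0 : (PySem.List.sorted (PySem.Set.ofList xs) (fun s => s)).Nodup :=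
    ((PySem.List.sorted_perm (PySem.Set.ofList xs) (fun s => s) false).nodup_iff).2
      (PySem.Set.nodup_ofList xs)
  have hmemU : ∀ s, s ∈ PySem.List.sorted (PySem.Set.ofList xs) (fun s => s) ↔ s ∈ xs := by
    intro s; rw [PySem.List.mem_sorted, PySem.Set.mem_ofList]
  have hg : ∀ s ∈ PySem.List.sorted (PySem.Set.ofList xs) (fun s => s),
      (pvOcc (PySem.List.enumerate xs) s).length ≠ 0 := by
    intro s hs
    rcases List.mem_iff_getElem.1 ((hmemU s).1 hs) with ⟨k, hk, rfl⟩
    have hp : ((0 : Int) + (k : Int), xs[k]) ∈ PySem.List.enumerate xs :=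
      (PySem.List.mem_enumerate_iff xs 0 _).2 ⟨k, hk, rfl⟩
    have : ((0 : Int) + (k : Int), xs[k]) ∈
        (PySem.List.enumerate xs).filter (fun p => p.2 == xs[k]) :=
      List.mem_filter.2 ⟨hp, by simp⟩
    simp only [pvOcc, List.length_map]
    intro hlen
    rw [List.length_eq_zero_iff.1 hlen] at this
    simp at this
  -- A's stable sort as the grouped layout
  have hSI := pvMain xs
  -- change_indices agree
  have hchange : (PySem.List.sorted (PySem.List.enumerate xs) (fun x => x.2)).map (fun p => p.1)
      = (PySem.List.sorted (PySem.Set.ofList xs) (fun s => s)).flatMap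
          (fun s => pvOcc (PySem.List.enumerate xs) s) := by
    rw [hSI, List.map_flatMap]
    rfl
  -- sorted shapes are the flat grouped layout
  have hss : (PySem.List.sorted (PySem.List.enumerate xs) (fun x => x.2)).map (fun p => p.2)
      = (PySem.List.sorted (PySem.Set.ofList xs) (fun s => s)).flatMap
          (fun s => List.replicate ((pvOcc (PySem.List.enumerate xs) s).length) s) := by
    rw [hSI, List.map_flatMap]
    apply List.flatMap_congr
    intro s _
    have hall : ∀ y ∈ ((PySem.List.enumerate xs).filter (fun p => p.2 == s)).map (fun p => p.2),
        y = s := by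
      intro y hy
      rcases List.mem_map.1 hy with ⟨p, hp, rfl⟩
      simpa using List.of_mem_filter hp
    have := List.eq_replicate_of_mem hall
    rw [this]
    simp [pvOcc]
  -- B's groups dict
  have hkeysB : (pvGrp (PySem.List.enumerate xs)).keys = PySem.Set.ofList xs := by
    rw [pvKeys_grp]
    rw [PySem.List.map_snd_enumerate]
  simp only [Prod.mk.injEq]
  refine ⟨?_, ?_, ?_, ?_⟩
  · -- unique_sorted_shapes
    show (pvGrp (PySem.List.enumerate
        ((PySem.List.sorted (PySem.List.enumerate xs) (fun x => x.2)).map (fun p => p.2)))).keys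
      = PySem.List.sorted (pvGrp (PySem.List.enumerate xs)).keys (fun s => s)
    rw [hkeysB, pvKeys_grp, PySem.List.map_snd_enumerate, hss]
    exact pvOfList_grouped _ _ hU0 hg
  · -- shape_groups items
    show (pvGrp (PySem.List.enumerate
        ((PySem.List.sorted (PySem.List.enumerate xs) (fun x => x.2)).map (fun p => p.2)))).items
      = _
    have hkeysA : (pvGrp (PySem.List.enumerate
        ((PySem.List.sorted (PySem.List.enumerate xs) (fun x => x.2)).map (fun p => p.2)))).keys
        = PySem.List.sorted (PySem.Set.ofList xs) (fun s => s) := by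
      rw [pvKeys_grp, PySem.List.map_snd_enumerate, hss]
      exact pvOfList_grouped _ _ hU0 hg
    have hnodupA : (pvGrp (PySem.List.enumerate
        ((PySem.List.sorted (PySem.List.enumerate xs) (fun x => x.2)).map (fun p => p.2)))).keys.Nodup := by
      rw [hkeysA]; exact hU0
    rw [PySem.Dict.items_eq_map_keys _ hnodupA [], hkeysA]
    have hitemsA : (PySem.List.sorted (PySem.Set.ofList xs) (fun s => s)).map
        (fun s => (s, (pvGrp (PySem.List.enumerate
          ((PySem.List.sorted (PySem.List.enumerate xs) (fun x => x.2)).map (fun p => p.2)))).getD s []))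
        = pvCanon (fun s => (pvOcc (PySem.List.enumerate xs) s).length)
            (PySem.List.sorted (PySem.Set.ofList xs) (fun s => s)) 0 := by
      simp only [pvGetD_grp, hss]
      exact pvPosl _ _ 0 hU0
    rw [hitemsA]
    -- B side
    rw [hkeysB]
    have hB := pvBFold (PySem.List.sorted (PySem.Set.ofList xs) (fun s => s))
      (fun s => (pvGrp (PySem.List.enumerate xs)).getD s []) PySem.Dict.empty 0 hU0
      (fun s _ => by simp [PySem.Dict.contains_empty])
    rw [hB]
    have : (fun s => ((pvGrp (PySem.List.enumerate xs)).getD s []).length)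
        = (fun s => (pvOcc (PySem.List.enumerate xs) s).length) := by
      funext s; rw [pvGetD_grp]
    rw [this]
    rfl
  · -- change_indices
    show (PySem.List.sorted (PySem.List.enumerate xs) (fun x => x.2)).map (fun p => p.1)
      = (PySem.List.sorted (pvGrp (PySem.List.enumerate xs)).keys (fun s => s)).foldl
          (fun acc s => acc ++ (pvGrp (PySem.List.enumerate xs)).getD s []) []
    rw [hkeysB, PySem.List.foldl_append_eq_flatMap, hchange]
    apply List.flatMap_congr
    intro s _
    rw [pvGetD_grp]
  · -- revert_indices
    show ((PySem.List.enumerate (PySem.List.sorted (PySem.List.enumerate xs) (fun x => x.2))).foldl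
        (fun rv q => rv.set q.2.1.toNat q.1) (List.replicate xs.length (0 : Int)))
      = _
    have hcb : (PySem.List.sorted (pvGrp (PySem.List.enumerate xs)).keys (fun s => s)).foldl
          (fun acc s => acc ++ (pvGrp (PySem.List.enumerate xs)).getD s []) []
        = (PySem.List.sorted (PySem.List.enumerate xs) (fun x => x.2)).map (fun p => p.1) := by
      rw [hkeysB, PySem.List.foldl_append_eq_flatMap, hchange]
      apply Eq.symm
      apply List.flatMap_congr
      intro s _
      rw [pvGetD_grp]
    rw [hcb, pvEnumerate_map, List.foldl_map]
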